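-- pv_equiv track=rewrite | github.com/Rafq77/Advent2015 | Advent2016/Day/Day_07.py | Kek
-- ===== SOURCE A (Python) =====
-- def Kek(kek, eke):
--     for i in range(len(kek)-2):
--         if (kek[i] == kek[i+2] and kek[i] != kek[i+1]):
--             for j in range(len(eke)-2):
--                 if (kek[i] == eke[j+1] and \
--                     kek[i+1] == eke[j] and \
--                     eke[j] == eke[j+2] and \
--                     eke[j] != eke[j+1]):
--                     return True
--     return False
-- ===== SOURCE B (Python) =====
-- def _sigs(s):
--     # ABA signature pairs (s[i], s[i+1]) of a string
--     return {(s[i], s[i + 1]) for i in range(len(s) - 2)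
--             if s[i] == s[i + 2] and s[i] != s[i + 1]}
--
-- def Kek(kek, eke):
--     sb = _sigs(eke)
--     return any((y, x) in sb for (x, y) in _sigs(kek))
-- ===== Notes on version B (the rewrite author's own statement) =====
-- stated objective: alternative
-- what changed: Replaced the nested scan (for each ABA of kek, rescan all of eke) by two independent passes that collect each string's ABA signature pairs into sets, then a single reversed-pair set lookup.
import Mathlib
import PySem

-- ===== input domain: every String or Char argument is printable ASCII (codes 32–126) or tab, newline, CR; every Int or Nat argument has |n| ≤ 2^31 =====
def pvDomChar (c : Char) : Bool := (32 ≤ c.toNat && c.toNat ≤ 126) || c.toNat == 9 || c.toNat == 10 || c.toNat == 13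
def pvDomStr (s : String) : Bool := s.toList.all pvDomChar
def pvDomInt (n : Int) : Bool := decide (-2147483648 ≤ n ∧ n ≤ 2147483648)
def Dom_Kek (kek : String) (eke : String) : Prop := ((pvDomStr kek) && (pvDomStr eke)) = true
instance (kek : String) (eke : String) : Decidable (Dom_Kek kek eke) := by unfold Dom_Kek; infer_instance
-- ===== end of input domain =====

-- B replaces A's nested scan by two independent ABA-signature set builds plus a reversed-pair set lookup (alternative decomposition, same exact result).


-- ===== PORT A =====
-- early 'return True' inside the two nested for-loops = nested List.any over the same ranges
def Kek (kek : String) (eke : String) : Bool :=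
  let ks := kek.toList
  let es := eke.toList
  (PySem.List.pyRange 0 ((ks.length : Int) - 2) 1).any (fun i =>
    (PySem.List.pyGetD ks i ' ' == PySem.List.pyGetD ks (i+2) ' ' &&
     PySem.List.pyGetD ks i ' ' != PySem.List.pyGetD ks (i+1) ' ') &&
    (PySem.List.pyRange 0 ((es.length : Int) - 2) 1).any (fun j =>
      PySem.List.pyGetD ks i ' ' == PySem.List.pyGetD es (j+1) ' ' &&
      PySem.List.pyGetD ks (i+1) ' ' == PySem.List.pyGetD es j ' ' &&
      PySem.List.pyGetD es j ' ' == PySem.List.pyGetD es (j+2) ' ' &&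
      PySem.List.pyGetD es j ' ' != PySem.List.pyGetD es (j+1) ' '))

-- ===== PORT B =====
-- Source B's _sigs: the set comprehension {(s[i], s[i+1]) for i in range(len(s)-2) if …}
def pvSigs (cs : List Char) : PySem.Set (Char × Char) :=
  PySem.Set.ofList
    (((PySem.List.pyRange 0 ((cs.length : Int) - 2) 1).filter (fun i =>
        PySem.List.pyGetD cs i ' ' == PySem.List.pyGetD cs (i+2) ' ' &&
        PySem.List.pyGetD cs i ' ' != PySem.List.pyGetD cs (i+1) ' ')).map
      (fun i => (PySem.List.pyGetD cs i ' ', PySem.List.pyGetD cs (i+1) ' ')))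

def Kek_alt (kek : String) (eke : String) : Bool :=
  let sb := pvSigs eke.toList
  (pvSigs kek.toList).any (fun p => PySem.Set.contains sb (p.2, p.1))

-- ===== PRECONDITION & SPEC =====
def Spec_Kek (kek : String) (eke : String) (out : Bool) : Prop := out = Kek_alt kek eke
instance (kek : String) (eke : String) (out : Bool) : Decidable (Spec_Kek kek eke out) := by unfold Spec_Kek; infer_instance

-- ===== CLAIM (what is proved, stated in full; the proofs are below) =====
def Claim_equal_Kek : Prop := ∀ (kek : String) (eke : String), Dom_Kek kek eke → Spec_Kek kek eke (Kek kek eke)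

-- ===== LEMMAS AND PROOFS =====

-- both programs are true exactly when some ABA of kek has a matching BAB in eke
theorem Kek_eq_alt (kek eke : String) : Kek kek eke = Kek_alt kek eke := by
  rw [Bool.eq_iff_iff]
  simp only [Kek, Kek_alt, pvSigs, List.any_eq_true, PySem.Set.mem_ofList,
    List.mem_map, List.mem_filter, Bool.and_eq_true, beq_iff_eq, bne_iff_ne,
    ne_eq, PySem.Set.contains, List.contains_eq_mem, decide_eq_true_eq]
  constructor
  · rintro ⟨i, hi, ⟨h1, h2⟩, j, hj, ⟨⟨e1, e2⟩, e3⟩, e4⟩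
    refine ⟨_, ⟨i, ⟨hi, h1, h2⟩, rfl⟩, j, ⟨hj, e3, e4⟩, ?_⟩
    simp only [Prod.mk.injEq]
    exact ⟨e2.symm, e1.symm⟩
  · rintro ⟨p, ⟨i, ⟨hi, h1, h2⟩, rfl⟩, j, ⟨hj, e3, e4⟩, hp⟩
    simp only [Prod.mk.injEq] at hp
    exact ⟨i, hi, ⟨h1, h2⟩, j, hj, ⟨⟨hp.2.symm, hp.1.symm⟩, e3⟩, e4⟩

-- ===== VERDICT (by name: the statement is the Claim_ definition above) =====
theorem Kek_spec : Claim_equal_Kek := by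
  intro kek eke _
  unfold Spec_Kek
  exact Kek_eq_alt kek eke
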